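-- pv_equiv track=rewrite | github.com/kolyasalubov/Lv-597.PythonCore | HW7/count_of_positives_or_sum_of_negatives.py | count_positives_sum_negatives
-- ===== SOURCE A (Python) =====
-- def count_positives_sum_negatives(arr):
--     if len(arr) == 0:
--         return arr
--     final = []
--     positive = []
--     negative = []
--     for i in arr:
--         if i > 0:
--             positive.append(i)
--         if i < 0:
--             negative.append(i)
--     final.append(len(positive))
--     final.append(sum(negative))
--     return final
-- ===== SOURCE B (Python) =====
-- def count_positives_sum_negatives(arr):
--     if not arr:
--         return arr
--     s = sorted(arr)
--     neg = 0
--     i = 0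
--     while i < len(s) and s[i] < 0:
--         neg += s[i]
--         i += 1
--     while i < len(s) and s[i] == 0:
--         i += 1
--     return [len(s) - i, neg]
-- ===== Notes on version B (the rewrite author's own statement) =====
-- stated objective: alternative
-- what changed: Instead of A's single pass that partitions the array into two intermediate lists and then reduces them, B sorts the array and scans the sorted prefix: it accumulates the leading negatives into a running sum, skips the zeros, and the remaining suffix length is the positive count.
import Mathlib
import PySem

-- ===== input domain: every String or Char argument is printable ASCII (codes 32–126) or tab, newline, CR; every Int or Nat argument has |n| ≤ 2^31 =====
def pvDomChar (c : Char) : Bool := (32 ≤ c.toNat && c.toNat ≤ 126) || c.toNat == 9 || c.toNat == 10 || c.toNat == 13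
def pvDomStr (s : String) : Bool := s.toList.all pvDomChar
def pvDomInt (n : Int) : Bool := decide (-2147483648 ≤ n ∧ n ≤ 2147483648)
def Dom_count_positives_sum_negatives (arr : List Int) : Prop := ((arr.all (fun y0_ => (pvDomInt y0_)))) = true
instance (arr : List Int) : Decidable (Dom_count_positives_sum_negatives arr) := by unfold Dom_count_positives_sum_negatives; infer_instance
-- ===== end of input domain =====

-- B replaces A's single partitioning pass with sort-then-scan: sum the leading
-- negatives of sorted(arr), skip zeros, count the rest (alternative; return value only).

-- ===== PORT A =====
-- A's loop over arr appending to `positive`/`negative`, as a foldl over the pair of lists.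
def count_positives_sum_negatives (arr : List Int) : List Int :=
  if arr.length = 0 then arr
  else
    let pn := arr.foldl (fun (acc : List Int × List Int) i =>
      let acc := if i > 0 then (acc.1 ++ [i], acc.2) else acc
      if i < 0 then (acc.1, acc.2 ++ [i]) else acc) ([], [])
    [(pn.1.length : Int), pn.2.sum]

-- ===== PORT B =====
-- B's first while loop: consume leading negatives of the (sorted) list, accumulating their sum.
def pvNegScan : Int → List Int → Int × List Int
  | neg, [] => (neg, [])
  | neg, x :: t => if x < 0 then pvNegScan (neg + x) t else (neg, x :: t)

-- B's second while loop: skip the leading zeros.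
def pvSkipZeros : List Int → List Int
  | [] => []
  | x :: t => if x = 0 then pvSkipZeros t else x :: t

def count_positives_sum_negatives_alt (arr : List Int) : List Int :=
  if arr = [] then arr
  else
    let s := PySem.List.sorted arr (fun x => x) false
    let (neg, rest) := pvNegScan 0 s
    let rest2 := pvSkipZeros rest
    [(rest2.length : Int), neg]

-- ===== PRECONDITION & SPEC =====
def Spec_count_positives_sum_negatives (arr : List Int) (out : List Int) : Prop := out = count_positives_sum_negatives_alt arr
instance (arr : List Int) (out : List Int) : Decidable (Spec_count_positives_sum_negatives arr out) := by unfold Spec_count_positives_sum_negatives; infer_instance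

-- ===== CLAIM (what is proved, stated in full; the proofs are below) =====
def Claim_equal_count_positives_sum_negatives : Prop := ∀ (arr : List Int), Dom_count_positives_sum_negatives arr → Spec_count_positives_sum_negatives arr (count_positives_sum_negatives arr)

-- ===== LEMMAS AND PROOFS =====

-- A's partitioning fold builds the two filtered sublists.
theorem pvFoldA (l : List Int) (p n : List Int) :
    l.foldl (fun (acc : List Int × List Int) i =>
      let acc := if i > 0 then (acc.1 ++ [i], acc.2) else acc
      if i < 0 then (acc.1, acc.2 ++ [i]) else acc) (p, n)
    = (p ++ l.filter (fun x => x > 0), n ++ l.filter (fun x => x < 0)) := by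
  induction l generalizing p n with
  | nil => simp
  | cons a l ih =>
    simp only [List.foldl_cons, List.filter_cons]
    by_cases h1 : a > 0 <;> by_cases h2 : a < 0 <;> simp [h1, h2, ih]

-- On a non-decreasing list, pvNegScan returns the sum of the negatives and the ≥0 suffix.
theorem pvNegScan_sorted (l : List Int) (a : Int) (hs : l.Pairwise (· ≤ ·)) :
    pvNegScan a l = (a + (l.filter (fun x => x < 0)).sum, l.filter (fun x => 0 ≤ x)) := by
  induction l generalizing a with
  | nil => simp [pvNegScan]
  | cons x t ih =>
    rcases List.pairwise_cons.mp hs with ⟨hx, ht⟩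
    by_cases h : x < 0
    · have : ¬ (0 ≤ x) := by omega
      simp [pvNegScan, h, this, ih _ ht, List.filter_cons]
      ring
    · have h0 : 0 ≤ x := by omega
      have hneg : t.filter (fun x => x < 0) = [] := by
        apply List.filter_eq_nil_iff.mpr
        intro y hy; have := hx y hy; simp; omega
      have hpos : t.filter (fun x => 0 ≤ x) = t := by
        apply List.filter_eq_self.mpr
        intro y hy; have := hx y hy; simp; omega
      simp [pvNegScan, h, h0, List.filter_cons, hneg, hpos]

-- On a non-decreasing list of non-negatives, pvSkipZeros drops exactly the zeros.
theorem pvSkipZeros_sorted (l : List Int) (hs : l.Pairwise (· ≤ ·))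
    (hnn : ∀ y ∈ l, 0 ≤ y) :
    pvSkipZeros l = l.filter (fun x => x > 0) := by
  induction l with
  | nil => simp [pvSkipZeros]
  | cons x t ih =>
    rcases List.pairwise_cons.mp hs with ⟨hx, ht⟩
    have hnt : ∀ y ∈ t, 0 ≤ y := fun y hy => hnn y (List.mem_cons_of_mem _ hy)
    by_cases h : x = 0
    · simp [pvSkipZeros, h, List.filter_cons, ih ht hnt]
    · have h0 : 0 < x := by have := hnn x (List.mem_cons_self) ; omega
      have hpos : t.filter (fun x => x > 0) = t := by
        apply List.filter_eq_self.mpr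
        intro y hy; have := hx y hy; simp; omega
      simp [pvSkipZeros, h, List.filter_cons, h0, hpos]

-- ===== VERDICT (by name: the statement is the Claim_ definition above) =====
theorem count_positives_sum_negatives_spec : Claim_equal_count_positives_sum_negatives := by
  intro arr _
  unfold Spec_count_positives_sum_negatives count_positives_sum_negatives count_positives_sum_negatives_alt
  cases arr with
  | nil => simp
  | cons a l =>
    simp only [List.length_cons, Nat.succ_ne_zero, reduceCtorEq, ite_false]
    rw [pvFoldA]
    set s := PySem.List.sorted (a :: l) (fun x => x) false with hsdef
    have hperm : s.Perm (a :: l) := PySem.List.sorted_perm _ _ _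
    have hpw : s.Pairwise (· ≤ ·) := PySem.List.sorted_pairwise _ _
    rw [pvNegScan_sorted s 0 hpw]
    have hnn : ∀ y ∈ s.filter (fun x => 0 ≤ x), 0 ≤ y := by
      intro y hy; simpa using (List.of_mem_filter hy)
    rw [pvSkipZeros_sorted _ (hpw.filter _) hnn]
    have hlen : ((s.filter (fun x => 0 ≤ x)).filter (fun x => x > 0)).length
        = ((a :: l).filter (fun x => x > 0)).length := by
      have : (s.filter (fun x => 0 ≤ x)).filter (fun x => x > 0)
          = s.filter (fun x => x > 0) := by
        rw [List.filter_filter]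
        apply List.filter_congr
        intro y _; simp; omega
      rw [this]
      exact (hperm.filter _).length_eq
    have hsum : (s.filter (fun x => x < 0)).sum = ((a :: l).filter (fun x => x < 0)).sum :=
      (hperm.filter _).sum_eq
    simp only [List.nil_append, zero_add]
    rw [hlen, hsum]
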